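-- pv_equiv track=rewrite | github.com/6210qwe/leetcode_py | leetcode_solutions/by_id/q2624.py | difference_between_element_sum_and_digit_sum
-- ===== SOURCE A (Python) =====
-- from typing import List, Optional
--
-- def difference_between_element_sum_and_digit_sum(nums: List[int]) -> int:
--     """
--     计算数组的元素和与数字和的绝对差。
--     """
--     element_sum = 0
--     digit_sum = 0
--
--     for num in nums:
--         element_sum += num
--         while num > 0:
--             digit_sum += num % 10
--             num //= 10
--
--     return abs(element_sum - digit_sum)
-- ===== SOURCE B (Python) =====
-- def difference_between_element_sum_and_digit_sum(nums):
--     element_sum = sum(nums)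
--     digit_sum = sum(int(c) for num in nums if num > 0 for c in str(num))
--     return abs(element_sum - digit_sum)
-- ===== Notes on version B (the rewrite author's own statement) =====
-- stated objective: idiomatic
-- what changed: Replaces the manual accumulator loop with %10//10 digit extraction by sum() over the list plus a generator that reads the digit sum off the decimal string str(num) of each positive number.
import Mathlib
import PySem

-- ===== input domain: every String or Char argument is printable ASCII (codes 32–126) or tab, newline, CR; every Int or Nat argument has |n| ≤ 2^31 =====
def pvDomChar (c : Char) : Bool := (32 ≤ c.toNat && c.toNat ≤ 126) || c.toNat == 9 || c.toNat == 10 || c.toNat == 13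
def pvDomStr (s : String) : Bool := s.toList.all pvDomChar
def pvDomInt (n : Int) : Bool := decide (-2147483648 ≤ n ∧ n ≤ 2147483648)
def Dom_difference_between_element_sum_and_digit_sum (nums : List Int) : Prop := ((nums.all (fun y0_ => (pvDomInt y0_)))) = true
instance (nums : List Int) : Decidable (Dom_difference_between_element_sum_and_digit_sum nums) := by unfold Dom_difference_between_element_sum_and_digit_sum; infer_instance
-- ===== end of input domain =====

-- B replaces A's manual accumulator loop with %10//10 extraction by sum(nums) plus a
-- generator reading each positive number's digit sum off its decimal string (idiomatic).

-- ===== PORT A =====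
-- the inner 'while num > 0: digit_sum += num % 10; num //= 10' loop
def pvDigitLoop (num : Int) (ds : Int) : Int :=
  if h : num > 0 then
    pvDigitLoop (PySem.Int.floordiv num 10) (ds + PySem.Int.mod num 10)
  else ds
termination_by num.toNat
decreasing_by
  simp only [PySem.Int.floordiv]
  rw [Int.fdiv_eq_ediv] <;> omega

def difference_between_element_sum_and_digit_sum (nums : List Int) : Int :=
  let p := nums.foldl (fun (acc : Int × Int) num =>
    (acc.1 + num, pvDigitLoop num acc.2)) (0, 0)
  |p.1 - p.2|

-- ===== PORT B =====
def difference_between_element_sum_and_digit_sum_alt (nums : List Int) : Int :=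
  let elementSum : Int := nums.sum
  -- sum(int(c) for num in nums if num > 0 for c in str(num));
  -- int(c) is ported as c.toNat - 48, exact on the digit chars str(num) yields for num > 0
  let digitSum : Int :=
    ((nums.filter (fun num => num > 0)).map
      (fun num => ((PySem.Int.toChars num).map (fun c => ((c.toNat : Int) - 48))).sum)).sum
  |elementSum - digitSum|

-- ===== PRECONDITION & SPEC =====
def Spec_difference_between_element_sum_and_digit_sum (nums : List Int) (out : Int) : Prop := out = difference_between_element_sum_and_digit_sum_alt nums
instance (nums : List Int) (out : Int) : Decidable (Spec_difference_between_element_sum_and_digit_sum nums out) := by unfold Spec_difference_between_element_sum_and_digit_sum; infer_instance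

-- ===== CLAIM (what is proved, stated in full; the proofs are below) =====
def Claim_equal_difference_between_element_sum_and_digit_sum : Prop := ∀ (nums : List Int), Dom_difference_between_element_sum_and_digit_sum nums → Spec_difference_between_element_sum_and_digit_sum nums (difference_between_element_sum_and_digit_sum nums)

-- ===== LEMMAS AND PROOFS =====

-- mathematical digit sum of a natural number
def pvDigSum (n : Nat) : Int :=
  if n = 0 then 0 else pvDigSum (n / 10) + ((n % 10 : Nat) : Int)
decreasing_by omega

theorem pvDigSum_zero : pvDigSum 0 = 0 := by
  rw [pvDigSum.eq_def]; simp

theorem pvDigSum_pos (n : Nat) (h : n ≠ 0) :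
    pvDigSum n = pvDigSum (n / 10) + ((n % 10 : Nat) : Int) := by
  rw [pvDigSum.eq_def]
  simp [h]

theorem pvDigitLoop_eq (num ds : Int) :
    pvDigitLoop num ds = ds + pvDigSum num.toNat := by
  by_cases h : num > 0
  · rw [pvDigitLoop.eq_def]
    simp only [h, dif_pos]
    rw [pvDigitLoop_eq (PySem.Int.floordiv num 10)]
    have h10 : PySem.Int.floordiv num 10 = ((num.toNat / 10 : Nat) : Int) := by
      simp only [PySem.Int.floordiv]
      rw [Int.fdiv_eq_ediv] <;> omega
    have hm : PySem.Int.mod num 10 = ((num.toNat % 10 : Nat) : Int) := by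
      simp only [PySem.Int.mod]
      rw [Int.fmod_eq_emod] <;> omega
    rw [h10, hm, Int.toNat_natCast]
    rw [pvDigSum_pos num.toNat (by omega)]
    ring
  · rw [pvDigitLoop.eq_def]
    simp only [h, dif_neg, not_false_iff]
    have : num.toNat = 0 := by omega
    rw [this, pvDigSum_zero]
    ring
termination_by num.toNat
decreasing_by simp only [PySem.Int.floordiv]; rw [Int.fdiv_eq_ediv] <;> omega

-- the char-level digit sum of Nat.toDigitsCore
theorem pvToDigitsCore_sum (fuel n : Nat) (ds : List Char)
    (hf : n < fuel) :
    ((Nat.toDigitsCore 10 fuel n ds).map (fun c => ((c.toNat : Int) - 48))).sum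
      = pvDigSum n + ((ds.map (fun c => ((c.toNat : Int) - 48))).sum) := by
  induction fuel generalizing n ds with
  | zero => omega
  | succ fuel ih =>
    rw [Nat.toDigitsCore]
    have hd : (((n % 10).digitChar.toNat : Int) - 48) = ((n % 10 : Nat) : Int) := by
      have : n % 10 < 10 := Nat.mod_lt _ (by omega)
      interval_cases h : n % 10 <;> simp [Nat.digitChar]
    by_cases h : n / 10 = 0
    · simp only [h, if_pos]
      rw [List.map_cons, List.sum_cons, hd]
      by_cases hn : n = 0
      · subst hn
        rw [pvDigSum_zero]
        simp
      · rw [pvDigSum_pos n hn, h, pvDigSum_zero]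
        ring
    · simp only [h, ite_false]
      rw [ih (n / 10) _ (by omega)]
      rw [List.map_cons, List.sum_cons, hd]
      rw [pvDigSum_pos n (by omega)]
      ring

theorem pvToChars_sum (num : Int) (h : num > 0) :
    ((PySem.Int.toChars num).map (fun c => ((c.toNat : Int) - 48))).sum = pvDigSum num.toNat := by
  have hneg : ¬ num < 0 := by omega
  simp only [PySem.Int.toChars, hneg, ite_false]
  rw [Nat.toDigits, pvToDigitsCore_sum (num.toNat + 1) num.toNat [] (by omega)]
  simp

-- the fold of A computes (es + Σ nums, ds + Σ digit sums of positives)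
theorem pvFold_eq (nums : List Int) (es ds : Int) :
    nums.foldl (fun (acc : Int × Int) num => (acc.1 + num, pvDigitLoop num acc.2)) (es, ds)
      = (es + nums.sum,
         ds + ((nums.filter (fun num => num > 0)).map
            (fun num => ((PySem.Int.toChars num).map (fun c => ((c.toNat : Int) - 48))).sum)).sum) := by
  induction nums generalizing es ds with
  | nil => simp
  | cons x xs ih =>
    rw [List.foldl_cons, ih, pvDigitLoop_eq, List.sum_cons]
    by_cases hx : x > 0
    · rw [Prod.mk.injEq]
      simp only [List.filter_cons, hx, decide_true, ite_true, List.map_cons, List.sum_cons,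
        pvToChars_sum x hx]
      constructor <;> ring
    · have hx0 : x.toNat = 0 := by omega
      rw [hx0, pvDigSum_zero, Prod.mk.injEq]
      simp only [List.filter_cons, hx, decide_false, Bool.false_eq_true, ite_false]
      constructor <;> ring

-- ===== VERDICT (by name: the statement is the Claim_ definition above) =====
theorem difference_between_element_sum_and_digit_sum_spec : Claim_equal_difference_between_element_sum_and_digit_sum := by
  intro nums _
  unfold Spec_difference_between_element_sum_and_digit_sum
  unfold difference_between_element_sum_and_digit_sum difference_between_element_sum_and_digit_sum_alt
  simp only [pvFold_eq, zero_add]
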